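-- pv_equiv track=rewrite | github.com/pythonitalia/pycon | backend/video_upload/workflows/upload_schedule_item_video.py | replace_invalid_chars_with_lookalikes
-- ===== SOURCE A (Python) =====
-- def replace_invalid_chars_with_lookalikes(text: str) -> str:
--     homoglyphs = {
--         "<": "\u1438",
--         ">": "\u1433",
--     }
--     for char, homoglyph in homoglyphs.items():
--         text = text.replace(char, homoglyph)
--     return text
-- ===== SOURCE B (Python) =====
-- def replace_invalid_chars_with_lookalikes(text: str) -> str:
--     homoglyphs = {
--         "<": "\u1438",
--         ">": "\u1433",
--     }
--     out = []
--     for ch in text: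
--         out.append(homoglyphs.get(ch, ch))
--     return "".join(out)
-- ===== Notes on version B (the rewrite author's own statement) =====
-- stated objective: alternative
-- what changed: B makes a single explicit pass over the characters, appending the homoglyph table lookup (default the character itself) and joining once, instead of A's two full-string str.replace scans.
import Mathlib
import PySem

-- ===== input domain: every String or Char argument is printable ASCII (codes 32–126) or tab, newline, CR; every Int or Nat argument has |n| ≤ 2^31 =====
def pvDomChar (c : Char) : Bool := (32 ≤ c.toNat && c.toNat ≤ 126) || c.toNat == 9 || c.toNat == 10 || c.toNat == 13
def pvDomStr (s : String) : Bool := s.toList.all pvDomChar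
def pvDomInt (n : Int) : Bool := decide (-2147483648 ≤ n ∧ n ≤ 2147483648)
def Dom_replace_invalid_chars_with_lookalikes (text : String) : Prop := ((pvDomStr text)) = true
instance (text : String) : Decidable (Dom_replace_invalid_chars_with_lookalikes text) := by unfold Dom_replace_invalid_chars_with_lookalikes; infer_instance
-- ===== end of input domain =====

-- B replaces A's two full-string str.replace scans by one explicit pass appending a
-- per-character table lookup; same return value on every input (alternative decomposition).

-- ===== PORT A =====
def replace_invalid_chars_with_lookalikes (text : String) : String :=
  let homoglyphs : PySem.Dict String String := PySem.Dict.ofList [("<", "\u1438"), (">", "\u1433")]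
  (PySem.Dict.items homoglyphs).foldl (fun t ch => PySem.Str.replace t ch.1 ch.2) text

-- ===== PORT B =====
def replace_invalid_chars_with_lookalikes_alt (text : String) : String :=
  let homoglyphs : PySem.Dict Char Char := PySem.Dict.ofList [('<', '\u1438'), ('>', '\u1433')]
  let out := text.toList.foldl (fun out ch => out ++ [PySem.Dict.getD homoglyphs ch ch]) []
  String.ofList out

-- ===== PRECONDITION & SPEC =====
def Spec_replace_invalid_chars_with_lookalikes (text : String) (out : String) : Prop := out = replace_invalid_chars_with_lookalikes_alt text
instance (text : String) (out : String) : Decidable (Spec_replace_invalid_chars_with_lookalikes text out) := by unfold Spec_replace_invalid_chars_with_lookalikes; infer_instance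

-- ===== CLAIM (what is proved, stated in full; the proofs are below) =====
def Claim_equal_replace_invalid_chars_with_lookalikes : Prop := ∀ (text : String), Dom_replace_invalid_chars_with_lookalikes text → Spec_replace_invalid_chars_with_lookalikes text (replace_invalid_chars_with_lookalikes text)

-- ===== LEMMAS AND PROOFS =====

-- replace.go with a single-character pattern is a pointwise map, given enough fuel
theorem replace_go_single (o n : Char) :
    ∀ (l : List Char) (fuel : Nat) (acc : List Char), l.length ≤ fuel →
      PySem.Chars.replace.go [o] [n] fuel l acc
        = acc.reverse ++ l.map (fun c => if c = o then n else c) := by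
  intro l
  induction l with
  | nil =>
    intro fuel acc _
    cases fuel <;> simp [PySem.Chars.replace.go]
  | cons c t ih =>
    intro fuel acc hfuel
    cases fuel with
    | zero => simp at hfuel
    | succ f =>
      simp only [PySem.Chars.replace.go]
      by_cases hc : c = o
      · subst hc
        simp [List.isPrefixOf, ih f (n :: acc) (by simpa using hfuel)]
      · simp [List.isPrefixOf, hc, Ne.symm hc, ih f (c :: acc) (by simpa using hfuel)]

-- single-character str.replace is a map over the characters
theorem replace_single (l : List Char) (o n : Char) :
    PySem.Chars.replace l [o] [n] = l.map (fun c => if c = o then n else c) := by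
  simpa [PySem.Chars.replace] using replace_go_single o n l l.length [] le_rfl

-- the items of port B's char-keyed dict literal
theorem items_homoglyphs_char :
    (PySem.Dict.ofList [('<', '\u1438'), ('>', '\u1433')]).items
      = [('<', '\u1438'), ('>', '\u1433')] := by
  show ((PySem.Dict.empty.insert '<' '\u1438').insert '>' '\u1433').items = _
  rw [show PySem.Dict.empty.insert '<' '\u1438' = PySem.Dict.mk [('<', '\u1438')] by
    simp [PySem.Dict.insert, PySem.Dict.empty, PySem.Dict.contains]]
  simp [PySem.Dict.insert, PySem.Dict.contains]

-- the character-keyed homoglyph lookup of port B, written as nested ifs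
theorem getD_homoglyphs (c : Char) :
    PySem.Dict.getD (PySem.Dict.ofList [('<', '\u1438'), ('>', '\u1433')]) c c
      = if c = '<' then '\u1438' else if c = '>' then '\u1433' else c := by
  by_cases h1 : c = '<'
  · subst h1; simp [PySem.Dict.getD, PySem.Dict.get?, items_homoglyphs_char]
  · by_cases h2 : c = '>'
    · subst h2; simp [PySem.Dict.getD, PySem.Dict.get?, items_homoglyphs_char]
    · simp only [PySem.Dict.getD, PySem.Dict.get?, items_homoglyphs_char]
      simp [List.find?,
        (show ('<' == c) = false by simp [Ne.symm h1]),
        (show ('>' == c) = false by simp [Ne.symm h2]), h1, h2]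

-- the items of port A's string-keyed dict literal
theorem items_homoglyphs :
    (PySem.Dict.ofList [("<", "\u1438"), (">", "\u1433")]).items
      = [("<", "\u1438"), (">", "\u1433")] := by
  show ((PySem.Dict.empty.insert "<" "\u1438").insert ">" "\u1433").items = _
  rw [show PySem.Dict.empty.insert "<" "\u1438" = PySem.Dict.mk [("<", "\u1438")] by
    simp [PySem.Dict.insert, PySem.Dict.empty, PySem.Dict.contains]]
  simp [PySem.Dict.insert, PySem.Dict.contains]

-- ===== VERDICT (by name: the statement is the Claim_ definition above) =====
theorem replace_invalid_chars_with_lookalikes_spec : Claim_equal_replace_invalid_chars_with_lookalikes := by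
  intro text _
  unfold Spec_replace_invalid_chars_with_lookalikes
  unfold replace_invalid_chars_with_lookalikes replace_invalid_chars_with_lookalikes_alt
  simp only [items_homoglyphs, List.foldl, PySem.Str.replace,
    PySem.List.foldl_append_singleton_eq_map, List.nil_append]
  congr 1
  rw [String.toList_ofList,
    show ("<".toList) = ['<'] from rfl, show (">".toList) = ['>'] from rfl,
    show ("\u1438".toList) = ['\u1438'] from rfl, show ("\u1433".toList) = ['\u1433'] from rfl,
    replace_single, replace_single, List.map_map]
  apply List.map_congr_left
  intro c _
  rw [Function.comp_apply, getD_homoglyphs]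
  by_cases h1 : c = '<' <;> by_cases h2 : c = '>' <;> simp [h1, h2]
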